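-- pv_equiv track=rewrite | github.com/Tay-Son/GH_CT | PRG-Completed/PRG 012984.py | solution
-- ===== SOURCE A (Python) =====
-- def solution(grd_land, P_, Q_):
--     N_ = len(grd_land) ** 2
--     lst_ = []
--     for each_lst in grd_land:
--         lst_.extend(each_lst)
--     lst_.sort()
--
--     lst_sum = sum(lst_)
--     min_ = lst_sum * Q_
--     temp_ = (lst_sum - lst_[0] * N_) * Q_
--     min_ = min(min_, temp_)
--
--     for idx_ in range(1, N_):
--         if lst_[idx_] != lst_[idx_ - 1]:
--             temp_ += (P_ * idx_ * (lst_[idx_] - lst_[idx_ - 1])) - (Q_ * (N_ - idx_) * (lst_[idx_] - lst_[idx_ - 1]))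
--             min_ = min(min_, temp_)
--
--     return min_
-- ===== SOURCE B (Python) =====
-- def solution(grd_land, P_, Q_):
--     N_ = len(grd_land) ** 2
--     lst_ = sorted(v for row in grd_land for v in row)
--     lst_sum = sum(lst_)
--     prefix = [0]
--     for i_ in range(N_):
--         prefix.append(prefix[i_] + lst_[i_])
--     best = lst_sum * Q_
--     for idx_ in range(N_):
--         h_ = lst_[idx_]
--         cost = P_ * (h_ * idx_ - prefix[idx_]) + Q_ * ((lst_sum - prefix[idx_]) - h_ * (N_ - idx_))
--         best = min(best, cost)
--     return best
-- ===== Notes on version B (the rewrite author's own statement) =====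
-- stated objective: alternative
-- what changed: Replaces A's incremental running-cost accumulator updated only at distinct-value boundaries with a precomputed prefix-sum table and a direct closed-form cost evaluation at every index, minimized over all indices.
import Mathlib
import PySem

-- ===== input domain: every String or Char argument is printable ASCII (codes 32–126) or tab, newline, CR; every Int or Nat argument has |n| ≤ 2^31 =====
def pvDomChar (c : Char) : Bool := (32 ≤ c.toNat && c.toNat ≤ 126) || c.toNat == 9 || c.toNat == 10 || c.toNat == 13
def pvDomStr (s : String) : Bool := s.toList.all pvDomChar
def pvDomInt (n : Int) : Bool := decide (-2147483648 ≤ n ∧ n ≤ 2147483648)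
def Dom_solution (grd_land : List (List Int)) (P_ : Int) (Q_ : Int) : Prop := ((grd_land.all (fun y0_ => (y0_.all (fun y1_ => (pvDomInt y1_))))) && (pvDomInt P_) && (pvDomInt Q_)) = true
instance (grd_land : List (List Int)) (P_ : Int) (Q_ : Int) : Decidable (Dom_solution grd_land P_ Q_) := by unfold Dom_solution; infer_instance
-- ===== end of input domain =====

-- B replaces A's incremental running-cost accumulator (updated only at value changes)
-- with a prefix-sum table and a per-index closed-form cost, minimized over every index.

-- ===== PORT A =====
-- loop body of A's 'for idx_ in range(1, N_)'
def pvAStep (lst_ : List Int) (N_ P_ Q_ : Int) (st : Int × Int) (idx_ : Int) : Int × Int :=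
  if PySem.List.pyGetD lst_ idx_ 0 ≠ PySem.List.pyGetD lst_ (idx_ - 1) 0 then
    let temp_ := st.1 + (P_ * idx_ * (PySem.List.pyGetD lst_ idx_ 0 - PySem.List.pyGetD lst_ (idx_ - 1) 0))
                      - (Q_ * (N_ - idx_) * (PySem.List.pyGetD lst_ idx_ 0 - PySem.List.pyGetD lst_ (idx_ - 1) 0))
    (temp_, min st.2 temp_)
  else st

def solution (grd_land : List (List Int)) (P_ : Int) (Q_ : Int) : Int :=
  let N_ : Int := (grd_land.length : Int) ^ 2
  let lst_ := PySem.List.sorted grd_land.flatten id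
  let lst_sum := lst_.sum
  let min_ := lst_sum * Q_
  let temp_ := (lst_sum - PySem.List.pyGetD lst_ 0 0 * N_) * Q_
  let min_ := min min_ temp_
  ((PySem.List.pyRange 1 N_ 1).foldl (pvAStep lst_ N_ P_ Q_) (temp_, min_)).2

-- ===== PORT B =====
-- body of B's prefix-table loop 'prefix.append(prefix[i_] + lst_[i_])'
def pvBPrefStep (lst_ : List Int) (p : List Int) (i_ : Int) : List Int :=
  p ++ [PySem.List.pyGetD p i_ 0 + PySem.List.pyGetD lst_ i_ 0]

-- body of B's candidate loop: direct closed-form cost at index idx_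
def pvBStep (lst_ pre : List Int) (lst_sum N_ P_ Q_ : Int) (best idx_ : Int) : Int :=
  let h_ := PySem.List.pyGetD lst_ idx_ 0
  min best (P_ * (h_ * idx_ - PySem.List.pyGetD pre idx_ 0)
            + Q_ * ((lst_sum - PySem.List.pyGetD pre idx_ 0) - h_ * (N_ - idx_)))

def solution_alt (grd_land : List (List Int)) (P_ : Int) (Q_ : Int) : Int :=
  let N_ : Int := (grd_land.length : Int) ^ 2
  let lst_ := PySem.List.sorted grd_land.flatten id
  let lst_sum := lst_.sum
  let pre := (PySem.List.pyRange 0 N_ 1).foldl (pvBPrefStep lst_) [0]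
  (PySem.List.pyRange 0 N_ 1).foldl (pvBStep lst_ pre lst_sum N_ P_ Q_) (lst_sum * Q_)

-- ===== PRECONDITION & SPEC =====
-- Pre_ excludes exactly the inputs where Python A raises IndexError: the empty grid
-- (lst_[0] fails) and grids with fewer than len(grd_land)**2 total cells (lst_[idx_] fails).
def Pre_solution (grd_land : List (List Int)) (P_ : Int) (Q_ : Int) : Prop :=
  grd_land ≠ [] ∧ grd_land.length ^ 2 ≤ grd_land.flatten.length

instance (grd_land : List (List Int)) (P_ : Int) (Q_ : Int) : Decidable (Pre_solution grd_land P_ Q_) := by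
  unfold Pre_solution; infer_instance

def pvWitness_solution : List (List Int) × Int × Int := ([[3, 1], [2, 2]], 2, 5)

def Spec_solution (grd_land : List (List Int)) (P_ : Int) (Q_ : Int) (out : Int) : Prop := out = solution_alt grd_land P_ Q_
instance (grd_land : List (List Int)) (P_ : Int) (Q_ : Int) (out : Int) : Decidable (Spec_solution grd_land P_ Q_ out) := by unfold Spec_solution; infer_instance

-- ===== CLAIM (what is proved, stated in full; the proofs are below) =====
def Claim_equal_solution : Prop := ∀ (grd_land : List (List Int)) (P_ : Int) (Q_ : Int), Dom_solution grd_land P_ Q_ → Pre_solution grd_land P_ Q_ → Spec_solution grd_land P_ Q_ (solution grd_land P_ Q_)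

-- ===== LEMMAS AND PROOFS =====

-- prefix sum of the first k elements
def pvPre (L : List Int) (k : Nat) : Int := (L.take k).sum

-- the closed-form cost B evaluates at index k
def pvCost (L : List Int) (S N P Q : Int) (k : Nat) : Int :=
  P * (L.getD k 0 * (k : Int) - pvPre L k)
  + Q * ((S - pvPre L k) - L.getD k 0 * (N - (k : Int)))

lemma pvPre_succ (L : List Int) (k : Nat) : pvPre L (k + 1) = pvPre L k + L.getD k 0 := by
  unfold pvPre
  rw [List.take_add_one]
  cases h : L[k]? <;> simp [List.getD, h]

-- when the values at k and k+1 agree, the cost is unchanged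
lemma pvCost_succ_eq (L : List Int) (S N P Q : Int) (k : Nat)
    (h : L.getD (k + 1) 0 = L.getD k 0) :
    pvCost L S N P Q (k + 1) = pvCost L S N P Q k := by
  unfold pvCost
  rw [pvPre_succ, h]
  push_cast
  ring

-- A's incremental update lands exactly on the closed-form cost
lemma pvCost_succ (L : List Int) (S N P Q : Int) (k : Nat) :
    pvCost L S N P Q (k + 1)
      = pvCost L S N P Q k
        + (P * ((k : Int) + 1) * (L.getD (k + 1) 0 - L.getD k 0))
        - (Q * (N - ((k : Int) + 1)) * (L.getD (k + 1) 0 - L.getD k 0)) := by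
  unfold pvCost
  rw [pvPre_succ]
  push_cast
  ring

lemma pvCost_zero (L : List Int) (S N P Q : Int) :
    pvCost L S N P Q 0 = (S - L.getD 0 0 * N) * Q := by
  unfold pvCost pvPre
  simp
  ring

-- the prefix table B builds is the table of prefix sums
lemma pvPrefix_eq (L : List Int) (m : Nat) :
    (PySem.List.pyRange 0 (m : Int) 1).foldl (pvBPrefStep L) [0]
      = (List.range (m + 1)).map (fun k => pvPre L k) := by
  induction m with
  | zero => simp [PySem.List.pyRange_one_eq_nil, pvPre]
  | succ m ih =>
    rw [Nat.cast_add, Nat.cast_one,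
        PySem.List.pyRange_one_succ_right (by positivity), List.foldl_append, ih]
    unfold pvBPrefStep
    rw [List.range_succ (n := m + 1), List.map_append]
    simp [PySem.List.pyGetD_natCast, pvPre_succ]

-- one step of A's loop at a Nat index a ≥ 1, started from the running cost at a-1
lemma pvAStep_cost (L : List Int) (S N P Q : Int) (m : Int) (a : Nat) (ha : 1 ≤ a) :
    pvAStep L N P Q (pvCost L S N P Q (a - 1), m) (a : Int)
      = (pvCost L S N P Q a,
         if L.getD a 0 ≠ L.getD (a - 1) 0 then min m (pvCost L S N P Q a) else m) := by
  have hidx : ((a : Int) - 1) = ((a - 1 : Nat) : Int) := by omega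
  have hsub : a - 1 + 1 = a := by omega
  unfold pvAStep
  rw [PySem.List.pyGetD_natCast, hidx, PySem.List.pyGetD_natCast]
  by_cases h : L.getD a 0 = L.getD (a - 1) 0
  · rw [if_neg (by simpa using h), if_neg (by simpa using h)]
    have := pvCost_succ_eq L S N P Q (a - 1) (by rw [hsub]; exact h)
    rw [hsub] at this
    rw [this]
  · rw [if_pos (by simpa using h), if_pos (by simpa using h)]
    have := pvCost_succ L S N P Q (a - 1)
    rw [hsub] at this
    have hcast : ((a - 1 : Nat) : Int) + 1 = (a : Int) := by omega
    rw [hcast] at this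
    simp only [this]

-- core loop equivalence: A's accumulator fold and B's direct-min fold agree
lemma pvLoop (L : List Int) (S N P Q : Int) :
    ∀ (c a : Nat) (m : Int), 1 ≤ a → m ≤ pvCost L S N P Q (a - 1) →
    ((List.range' a c).foldl
        (fun st (k : Nat) => pvAStep L N P Q st (k : Int)) (pvCost L S N P Q (a - 1), m)).2
      = (List.range' a c).foldl (fun b (k : Nat) => min b (pvCost L S N P Q k)) m := by
  intro c
  induction c with
  | zero => intro a m _ _; simp
  | succ c ih =>
    intro a m ha hm
    rw [List.range'_succ, List.foldl_cons, List.foldl_cons]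
    simp only [pvAStep_cost L S N P Q m a ha]
    by_cases h : L.getD a 0 = L.getD (a - 1) 0
    · rw [if_neg (by simpa using h)]
      have heq : pvCost L S N P Q a = pvCost L S N P Q (a - 1) := by
        have := pvCost_succ_eq L S N P Q (a - 1)
          (by rw [show a - 1 + 1 = a by omega]; exact h)
        rw [show a - 1 + 1 = a by omega] at this
        exact this
      rw [min_eq_left (by rw [heq]; exact hm)]
      have h1 := ih (a + 1) m (by omega)
      rw [show a + 1 - 1 = a by omega] at h1
      exact h1 (by rw [heq]; exact hm)
    · rw [if_pos (by simpa using h)]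
      have h1 := ih (a + 1) (min m (pvCost L S N P Q a)) (by omega)
      rw [show a + 1 - 1 = a by omega] at h1
      exact h1 (min_le_right _ _)

-- ===== VERDICT (by name: the statement is the Claim_ definition above) =====
theorem solution_spec : Claim_equal_solution := by
  intro grd_land P_ Q_ _hdom hpre
  obtain ⟨hne, _hlen⟩ := hpre
  unfold Spec_solution solution solution_alt
  dsimp only
  set L := PySem.List.sorted grd_land.flatten id with hL
  set n := grd_land.length with hn
  have hn1 : 1 ≤ n := by
    cases grd_land with
    | nil => exact absurd rfl hne
    | cons h t => simp [hn]
  set S := L.sum with hS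
  set Nn : Nat := n * n with hNn
  have hNcast : ((n : Int) ^ 2) = ((Nn : Nat) : Int) := by push_cast [hNn]; ring
  rw [hNcast, pvPrefix_eq L Nn]
  have hrange : PySem.List.pyRange 0 (Nn : Int) 1 = (List.range' 0 Nn).map (fun (k : Nat) => (k : Int)) := by
    rw [PySem.List.pyRange_one, List.range'_eq_map_range, List.map_map,
        show ((Nn : Int) - 0).toNat = Nn by omega]
    simp [Function.comp]
  have hrange1 : PySem.List.pyRange 1 (Nn : Int) 1
      = (List.range' 1 (Nn - 1)).map (fun (k : Nat) => (k : Int)) := by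
    rw [PySem.List.pyRange_one, List.range'_eq_map_range, List.map_map,
        show ((Nn : Int) - 1).toNat = Nn - 1 by omega]
    simp [Function.comp]
  rw [hrange, hrange1, List.foldl_map, List.foldl_map]
  have hB : ∀ (b : Int), ∀ k ∈ List.range' 0 Nn,
      pvBStep L ((List.range (Nn + 1)).map (fun k => pvPre L k)) S ((Nn : Nat) : Int) P_ Q_ b (k : Int)
        = min b (pvCost L S ((Nn : Nat) : Int) P_ Q_ k) := by
    intro b k hk
    have hk' : k < Nn := by simpa using (List.mem_range'_1.mp hk).2
    unfold pvBStep pvCost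
    simp only [PySem.List.pyGetD_natCast,
      PySem.List.getD_map_range _ _ _ _ (show k < Nn + 1 by omega)]
  rw [PySem.List.foldl_congr_mem _ _ _ _ hB]
  have hNn1 : 1 ≤ Nn := by simp [hNn]; omega
  rw [show List.range' 0 Nn = 0 :: List.range' 1 (Nn - 1) by
        rw [show Nn = (Nn - 1) + 1 by omega]; rw [List.range'_succ]; simp,
      List.foldl_cons]
  have htemp : (S - PySem.List.pyGetD L 0 0 * ((Nn : Nat) : Int)) * Q_
      = pvCost L S ((Nn : Nat) : Int) P_ Q_ 0 := by
    rw [pvCost_zero, PySem.List.pyGetD_zero]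
  rw [htemp]
  have h1 := pvLoop L S ((Nn : Nat) : Int) P_ Q_ (Nn - 1) 1
    (min (S * Q_) (pvCost L S ((Nn : Nat) : Int) P_ Q_ 0)) (by omega)
    (by simpa using min_le_right _ _)
  simp at h1 ⊢
  exact h1
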